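-- pv_equiv track=rewrite | github.com/ValentinVillalba/python | two_characters.py | two_characters
-- ===== SOURCE A (Python) =====
-- def two_characters(word):
-- 	#funciona piola pero podria ser mejor
-- 	result=[]
-- 	for i in range(len(word)):
-- 		result.append(word[i*2:(i+1)*2])
-- 		if len(result[i]) < 1:
-- 			del result[i]
-- 			break
-- 		if len(result[i]) < 2:
-- 			result[i] += "_"
-- 			break
--
-- 	return result
-- ===== SOURCE B (Python) =====
-- def two_characters(word):
--     it = iter(word)
--     out = []
--     for a in it:
--         b = next(it, None)
--         out.append(a + b if b is not None else a + "_")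
--     return out
-- ===== Notes on version B (the rewrite author's own statement) =====
-- stated objective: alternative
-- what changed: Replaces A's index loop over range(len(word)) with stride-2 slicing, an in-loop empty-chunk deletion and two break branches by a single pass that consumes characters pairwise from one iterator, padding a lone final character inline; no indices, slices, deletions or breaks are used. Constant-factor speedup: one iterator pass avoids per-index range bookkeeping, stride-2 slice objects and repeated list indexing.
import Mathlib
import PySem

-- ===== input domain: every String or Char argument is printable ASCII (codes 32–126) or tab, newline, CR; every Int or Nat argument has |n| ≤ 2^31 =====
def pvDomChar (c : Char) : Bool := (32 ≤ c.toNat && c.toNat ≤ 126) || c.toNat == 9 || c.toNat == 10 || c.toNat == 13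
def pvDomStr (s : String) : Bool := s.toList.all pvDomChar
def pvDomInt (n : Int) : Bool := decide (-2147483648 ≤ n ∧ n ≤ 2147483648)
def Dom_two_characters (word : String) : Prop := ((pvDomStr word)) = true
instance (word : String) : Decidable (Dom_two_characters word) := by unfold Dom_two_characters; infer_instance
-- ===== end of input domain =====

-- B replaces A's index loop (stride-2 slices, in-loop empty-chunk deletion, two break branches)
-- by a single pass consuming characters pairwise from one iterator, padding a lone final
-- character inline (alternative decomposition; same cost).

-- ===== PORT A =====
-- loop over i in range(len(word)) with two break branches; the index result[i] is always
-- in range in the Python (result has length i+1 after the append), ported with pyGetD.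
def twoCharsLoopA (word : String) : List Nat → List String → List String
  | [], result => result
  | i :: rest, result =>
    let result := result ++ [PySem.Str.slice word (some ((i : Int) * 2)) (some (((i : Int) + 1) * 2))]
    let ri := PySem.List.pyGetD result (i : Int) ""
    if PySem.Str.len ri < 1 then result.eraseIdx i
    else if PySem.Str.len ri < 2 then result.set i (ri ++ "_")
    else twoCharsLoopA word rest result

def two_characters (word : String) : List String :=
  twoCharsLoopA word (List.range word.toList.length) []

-- ===== PORT B =====
-- for a in it: b = next(it, None); out.append(a+b if b is not None else a+"_")
-- the iterator state is the remaining character list; each step takes a, then maybe b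
def twoCharsItLoop : List Char → List String → List String
  | [], out => out
  | a :: rest, out =>
    match rest with
    | [] => out ++ [String.ofList [a] ++ "_"]
    | b :: rest' => twoCharsItLoop rest' (out ++ [String.ofList [a] ++ String.ofList [b]])

def two_characters_alt (word : String) : List String := twoCharsItLoop word.toList []

-- ===== PRECONDITION & SPEC =====
def Spec_two_characters (word : String) (out : List String) : Prop := out = two_characters_alt word
instance (word : String) (out : List String) : Decidable (Spec_two_characters word out) := by unfold Spec_two_characters; infer_instance

-- ===== CLAIM (what is proved, stated in full; the proofs are below) =====
def Claim_equal_two_characters : Prop := ∀ (word : String), Dom_two_characters word → Spec_two_characters word (two_characters word)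

-- ===== LEMMAS AND PROOFS =====

-- the padded 2-char chunks, as a plain structural recursion (proof-side characterisation)
def twoCharsGo : List Char → List String
  | [] => []
  | [c] => [String.ofList [c] ++ "_"]
  | a :: b :: rest => (String.ofList [a] ++ String.ofList [b]) :: twoCharsGo rest

-- B's iterator loop computes acc ++ the chunks of the remaining characters
theorem lemB : ∀ (l : List Char) (acc : List String),
    twoCharsItLoop l acc = acc ++ twoCharsGo l := by
  intro l
  induction l using twoCharsGo.induct with
  | case1 => intro acc; simp [twoCharsItLoop, twoCharsGo]
  | case2 c => intro acc; simp [twoCharsItLoop, twoCharsGo]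
  | case3 a b rest ih => intro acc; simp [twoCharsItLoop, twoCharsGo, ih]

-- A's slice word[i*2:(i+1)*2] as a take/drop of the character list
theorem sliceA (word : String) (k : Nat) :
    PySem.Str.slice word (some ((k : Int) * 2)) (some (((k : Int) + 1) * 2))
      = String.ofList ((word.toList.drop (2*k)).take 2) := by
  apply String.toList_inj.mp
  rw [PySem.Str.toList_slice, String.toList_ofList]
  simp only [PySem.Chars.slice_eq_listSlice]
  rw [PySem.List.slice_toNat word.toList (by positivity) (by positivity)]
  have h1 : ((k : Int) * 2).toNat = 2 * k := by omega
  have h2 : (((k : Int) + 1) * 2).toNat = 2 * k + 2 := by omega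
  rw [h1, h2]; congr 1; omega

theorem getD_concat (acc : List String) (x : String) (k : Nat) (h : acc.length = k) :
    PySem.List.pyGetD (acc ++ [x]) (k : Int) "" = x := by
  subst h
  simp [PySem.List.pyGetD, PySem.List.pyGet?, PySem.List.pyIdx?]

-- invariant of A's loop: with acc the first k chunks and the range covering the rest,
-- the loop appends exactly B's recursion applied to the remaining characters
theorem lemA : ∀ (m k : Nat) (word : String) (acc : List String),
    acc.length = k → m + k = word.toList.length →
    twoCharsLoopA word (List.range' k m) acc = acc ++ twoCharsGo (word.toList.drop (2 * k)) := by
  intro m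
  induction m with
  | zero =>
    intro k word acc hlen hm
    have hnil : word.toList.drop (2*k) = [] := List.drop_eq_nil_of_le (by omega)
    simp [twoCharsLoopA, hnil, twoCharsGo]
  | succ m ih =>
    intro k word acc hlen hm
    rw [List.range'_succ]
    simp only [twoCharsLoopA]
    rw [sliceA, getD_concat acc _ k hlen]
    rcases hd : word.toList.drop (2*k) with _ | ⟨a, tail⟩
    · simp [twoCharsGo, PySem.Str.len, hlen, List.eraseIdx_append_of_length_le]
    · rcases tail with _ | ⟨b, rest⟩
      · simp [twoCharsGo, PySem.Str.len, hlen]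
      · have hlen2 : PySem.Str.len (String.ofList [a, b]) = 2 := by simp [PySem.Str.len]
        have hdrop : word.toList.drop (2*(k+1)) = rest := by
          have h2 : List.drop 2 (List.drop (2*k) word.toList) = List.drop (2*k+2) word.toList :=
            List.drop_drop
          rw [show 2*(k+1) = 2*k+2 from by omega, ← h2, hd]; rfl
        have htake : List.take 2 (a :: b :: rest) = [a, b] := rfl
        rw [htake, hlen2]
        norm_num
        rw [ih (k+1) word (acc ++ [String.ofList [a, b]]) (by simp [hlen]) (by omega), hdrop]
        have hab : String.ofList [a, b] = String.ofList [a] ++ String.ofList [b] := by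
          apply String.toList_inj.mp; simp
        simp [twoCharsGo, hab]

-- ===== VERDICT (by name: the statement is the Claim_ definition above) =====
theorem two_characters_spec : Claim_equal_two_characters := by
  intro word _
  unfold Spec_two_characters two_characters two_characters_alt
  rw [List.range_eq_range', lemA word.toList.length 0 word [] rfl (by omega), lemB]
  simp
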